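-- pv_equiv track=rewrite | github.com/hasnainzaidi/divan-translation | ganjoor_fetcher.py | _parse_plain_text_verses
-- ===== SOURCE A (Python) =====
-- def _parse_plain_text_verses(plain_text: str) -> list:
--     """
--     Parse verses from plainText format.
--
--     The plainText format has each hemistich on its own line.
--     Lines alternate: hemistich1, hemistich2, hemistich1, hemistich2...
--     So we pair them up to form couplets (beyts).
--     """
--     import re
--     verses = []
--
--     # Normalize line endings and split
--     text = plain_text.replace('\r\n', '\n').replace('\r', '\n')
--     lines = [line.strip() for line in text.split('\n') if line.strip()]
--
--     # Pair up lines into couplets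
--     for i in range(0, len(lines), 2):
--         hemistich1 = lines[i] if i < len(lines) else ""
--         hemistich2 = lines[i + 1] if i + 1 < len(lines) else ""
--
--         if hemistich1:  # At least first hemistich must exist
--             verses.append({
--                 "hemistich1": hemistich1,
--                 "hemistich2": hemistich2
--             })
--
--     return verses
-- ===== SOURCE B (Python) =====
-- def _parse_plain_text_verses(plain_text: str) -> list:
--     """Pair consecutive non-empty stripped lines into couplet dicts.
--
--     Same preprocessing as before; the pairing walks ONE iterator, taking the
--     next line (or the empty string) as the second hemistich, instead of a range-step index
--     loop with bounds checks.
--     """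
--     text = plain_text.replace('\r\n', '\n').replace('\r', '\n')
--     lines = [line.strip() for line in text.split('\n') if line.strip()]
--
--     verses = []
--     it = iter(lines)
--     for hemistich1 in it:
--         verses.append({
--             "hemistich1": hemistich1,
--             "hemistich2": next(it, "")
--         })
--     return verses
-- ===== Notes on version B (the rewrite author's own statement) =====
-- stated objective: idiomatic
-- what changed: The range(0,len,2) index loop with per-index bounds checks and a truthiness guard is replaced by a single iterator walk that pairs each line with the following line (or the empty string when the line count is odd); the guard disappears because filtered lines are nonempty.
import Mathlib
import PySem

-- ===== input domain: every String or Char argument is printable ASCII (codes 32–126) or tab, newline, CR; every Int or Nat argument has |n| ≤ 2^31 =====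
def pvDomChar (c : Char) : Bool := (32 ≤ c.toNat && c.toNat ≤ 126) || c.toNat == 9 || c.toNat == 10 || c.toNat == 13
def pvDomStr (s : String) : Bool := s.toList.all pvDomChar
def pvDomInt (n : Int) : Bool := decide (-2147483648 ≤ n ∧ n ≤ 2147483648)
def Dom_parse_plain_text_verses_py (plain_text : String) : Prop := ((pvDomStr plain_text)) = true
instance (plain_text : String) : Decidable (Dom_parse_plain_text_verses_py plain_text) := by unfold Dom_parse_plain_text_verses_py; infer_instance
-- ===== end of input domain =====

-- B replaces A's range(0, len, 2) index loop (with per-index bounds checks and a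
-- truthiness guard) by a single iterator walk pairing each line with the next or "";
-- same preprocessing, same return value (objective: idiomatic).


-- ===== PORT A =====
-- `text.split('\n')` with a nonempty literal separator: PySem.Str.split? is none only for sep = "", so getD [] is exact here.
def parse_plain_text_verses_py (plain_text : String) : List (List (String × String)) :=
  let text := PySem.Str.replace (PySem.Str.replace plain_text "\r\n" "\n") "\r" "\n"
  let lines := ((PySem.Str.split? text "\n").getD []).filter
      (fun line => PySem.Str.strip line != "") |>.map (fun line => PySem.Str.strip line)
  (PySem.List.pyRange 0 (lines.length : Int) 2).foldl
    (fun verses i =>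
      let hemistich1 := if i < (lines.length : Int) then PySem.List.pyGetD lines i "" else ""
      let hemistich2 := if i + 1 < (lines.length : Int) then PySem.List.pyGetD lines (i + 1) "" else ""
      if hemistich1 ≠ "" then
        verses ++ [[("hemistich1", hemistich1), ("hemistich2", hemistich2)]]
      else verses) []

-- ===== PORT B =====
-- B's loop: take the head, pair it with the following line (or the empty string), continue after both.
def pairCouplets : List String → List (List (String × String))
  | [] => []
  | h1 :: rest =>
    [("hemistich1", h1), ("hemistich2", rest.headD "")] :: pairCouplets rest.tail
  termination_by l => l.length
  decreasing_by simp [List.length_tail]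

def parse_plain_text_verses_py_alt (plain_text : String) : List (List (String × String)) :=
  let text := PySem.Str.replace (PySem.Str.replace plain_text "\r\n" "\n") "\r" "\n"
  let lines := ((PySem.Str.split? text "\n").getD []).filter
      (fun line => PySem.Str.strip line != "") |>.map (fun line => PySem.Str.strip line)
  pairCouplets lines

-- ===== PRECONDITION & SPEC =====
def Spec_parse_plain_text_verses_py (plain_text : String) (out : List (List (String × String))) : Prop := out = parse_plain_text_verses_py_alt plain_text
instance (plain_text : String) (out : List (List (String × String))) : Decidable (Spec_parse_plain_text_verses_py plain_text out) := by unfold Spec_parse_plain_text_verses_py; infer_instance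

-- ===== CLAIM (what is proved, stated in full; the proofs are below) =====
def Claim_equal_parse_plain_text_verses_py : Prop := ∀ (plain_text : String), Dom_parse_plain_text_verses_py plain_text → Spec_parse_plain_text_verses_py plain_text (parse_plain_text_verses_py plain_text)

-- ===== LEMMAS AND PROOFS =====
lemma pyRange_two_nil (a b : Int) (h : b ≤ a) : PySem.List.pyRange a b 2 = [] := by
  rw [PySem.List.pyRange_of_pos a b (by norm_num)]
  simp [show ¬ a < b by omega]

lemma pyRange_two_cons (a b : Int) (h : a < b) :
    PySem.List.pyRange a b 2 = a :: PySem.List.pyRange (a + 2) b 2 := by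
  rw [PySem.List.pyRange_of_pos a b (by norm_num), PySem.List.pyRange_of_pos (a+2) b (by norm_num)]
  by_cases h2 : a + 2 < b
  · rw [if_pos h, if_pos h2,
      show ((b - a + 2 - 1) / 2).toNat = ((b - (a+2) + 2 - 1) / 2).toNat + 1 by omega,
      List.range_succ_eq_map]
    simp only [List.map_cons, List.map_map]
    refine congrArg₂ _ (by simp) (List.map_congr_left fun k _ => ?_)
    simp only [Function.comp_apply, Nat.succ_eq_add_one]
    push_cast; ring
  · rw [if_pos h, if_neg h2, show ((b - a + 2 - 1) / 2).toNat = 1 by omega]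
    simp

lemma pyRange_two_shift (b : Int) :
    PySem.List.pyRange (0 + 2) (b + 2) 2 = (PySem.List.pyRange 0 b 2).map (· + 2) := by
  rw [PySem.List.pyRange_of_pos (0+2) (b+2) (by norm_num), PySem.List.pyRange_of_pos 0 b (by norm_num)]
  by_cases hb : 0 < b
  · rw [if_pos (show (0:Int)+2 < b+2 by omega), if_pos hb]
    rw [show (b + 2 - (0+2) + 2 - 1) / 2 = (b - 0 + 2 - 1) / 2 by ring_nf]
    rw [List.map_map]
    exact List.map_congr_left (fun k _ => by simp; ring)
  · rw [if_neg (show ¬((0:Int)+2 < b+2) by omega), if_neg hb]; simp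

lemma pyGetD_cons_cons (h1 h2 : String) (rest : List String) (i : Int) (h0 : 0 ≤ i)
    (hlt : i < (rest.length : Int)) :
    PySem.List.pyGetD (h1 :: h2 :: rest) (i + 2) "" = PySem.List.pyGetD rest i "" := by
  rw [PySem.List.pyGetD_eq_getElem (h1 :: h2 :: rest) "" (by omega)
      (by simp only [List.length_cons]; push_cast; omega),
    PySem.List.pyGetD_eq_getElem rest "" h0 hlt]
  have ht : (i + 2).toNat = i.toNat + 2 := by omega
  simp [ht]

lemma loop_eq : ∀ (n : Nat) (ls : List String), ls.length = n → (∀ x ∈ ls, x ≠ "") →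
    ∀ acc : List (List (String × String)),
    (PySem.List.pyRange 0 (ls.length : Int) 2).foldl
      (fun verses i =>
        let hemistich1 := if i < (ls.length : Int) then PySem.List.pyGetD ls i "" else ""
        let hemistich2 := if i + 1 < (ls.length : Int) then PySem.List.pyGetD ls (i + 1) "" else ""
        if hemistich1 ≠ "" then
          verses ++ [[("hemistich1", hemistich1), ("hemistich2", hemistich2)]]
        else verses) acc
    = acc ++ pairCouplets ls := by
  intro n
  induction n using Nat.strong_induction_on with
  | _ n ih =>
    intro ls hlen hne acc
    match ls with
    | [] =>
      simp [pyRange_two_nil 0 0 le_rfl, pairCouplets]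
    | [h1] =>
      have hh1 : h1 ≠ "" := hne h1 (by simp)
      rw [show (([h1] : List String).length : Int) = 1 by simp,
        pyRange_two_cons 0 1 (by norm_num), pyRange_two_nil (0 + 2) 1 (by norm_num)]
      simp [PySem.List.pyGetD_zero_cons, hh1, pairCouplets]
    | h1 :: h2 :: rest =>
      have hh1 : h1 ≠ "" := hne h1 (by simp)
      have hL : (((h1 :: h2 :: rest) : List String).length : Int) = (rest.length : Int) + 2 := by
        simp only [List.length_cons]; push_cast; ring
      rw [hL, pyRange_two_cons 0 ((rest.length : Int) + 2) (by omega), List.foldl_cons,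
        pyRange_two_shift, List.foldl_map]
      have step1 : (let hemistich1 := if (0 : Int) < (rest.length : Int) + 2 then PySem.List.pyGetD (h1 :: h2 :: rest) 0 "" else ""
          let hemistich2 := if (0 : Int) + 1 < (rest.length : Int) + 2 then PySem.List.pyGetD (h1 :: h2 :: rest) ((0 : Int) + 1) "" else ""
          if hemistich1 ≠ "" then
            acc ++ [[("hemistich1", hemistich1), ("hemistich2", hemistich2)]]
          else acc)
          = acc ++ [[("hemistich1", h1), ("hemistich2", h2)]] := by
        have c1 : (0 : Int) < (rest.length : Int) + 2 := by omega
        have c2 : (1 : Int) < (rest.length : Int) + 2 := by omega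
        have g2 : PySem.List.pyGetD (h1 :: h2 :: rest) (1 : Int) "" = h2 := by
          rw [PySem.List.pyGetD_eq_getElem (h1 :: h2 :: rest) "" (by omega)
            (by simp only [List.length_cons]; push_cast; omega)]
          simp
        simp [c1, c2, g2, PySem.List.pyGetD_zero_cons, hh1]
      rw [step1]
      have hcongr : ∀ (acc' : List (List (String × String))),
          ∀ i ∈ PySem.List.pyRange 0 (rest.length : Int) 2,
          (fun (x : List (List (String × String))) (y : Int) =>
            let hemistich1 := if y + 2 < (rest.length : Int) + 2 then PySem.List.pyGetD (h1 :: h2 :: rest) (y + 2) "" else ""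
            let hemistich2 := if y + 2 + 1 < (rest.length : Int) + 2 then PySem.List.pyGetD (h1 :: h2 :: rest) (y + 2 + 1) "" else ""
            if hemistich1 ≠ "" then
              x ++ [[("hemistich1", hemistich1), ("hemistich2", hemistich2)]]
            else x) acc' i
          = (fun (verses : List (List (String × String))) (i : Int) =>
              let hemistich1 := if i < (rest.length : Int) then PySem.List.pyGetD rest i "" else ""
              let hemistich2 := if i + 1 < (rest.length : Int) then PySem.List.pyGetD rest (i + 1) "" else ""
              if hemistich1 ≠ "" then
                verses ++ [[("hemistich1", hemistich1), ("hemistich2", hemistich2)]]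
              else verses) acc' i := by
        intro acc' i hi
        obtain ⟨hi0, hi1, -⟩ := (PySem.List.mem_pyRange_iff_of_pos (by norm_num) i).mp hi
        have hget1 := pyGetD_cons_cons h1 h2 rest i hi0 hi1
        by_cases hc : i + 1 < (rest.length : Int)
        · have hget2 : PySem.List.pyGetD (h1 :: h2 :: rest) (i + 2 + 1) "" = PySem.List.pyGetD rest (i + 1) "" := by
            rw [show i + 2 + 1 = (i + 1) + 2 by ring]
            exact pyGetD_cons_cons h1 h2 rest (i + 1) (by omega) hc
          simp [show i + 2 < (rest.length : Int) + 2 from by omega, hi1, hget1,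
            show i + 2 + 1 < (rest.length : Int) + 2 from by omega, hc, hget2]
        · simp [show i + 2 < (rest.length : Int) + 2 from by omega, hi1, hget1,
            show ¬ (i + 2 + 1 < (rest.length : Int) + 2) from by omega, hc]
      refine Eq.trans (PySem.List.foldl_congr_mem _ _ _ _ hcongr) ?_
      refine Eq.trans (ih rest.length (by omega) rest rfl (fun x hx => hne x (by simp [hx])) _) ?_
      simp [pairCouplets]

-- ===== VERDICT (by name: the statement is the Claim_ definition above) =====
theorem parse_plain_text_verses_py_spec : Claim_equal_parse_plain_text_verses_py := by
  intro plain_text _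
  unfold Spec_parse_plain_text_verses_py parse_plain_text_verses_py parse_plain_text_verses_py_alt
  have hne : ∀ x ∈ (((PySem.Str.split? (PySem.Str.replace (PySem.Str.replace plain_text "\r\n" "\n") "\r" "\n") "\n").getD []).filter
      (fun line => PySem.Str.strip line != "")).map (fun line => PySem.Str.strip line), x ≠ "" := by
    intro x hx
    simp only [List.mem_map, List.mem_filter] at hx
    obtain ⟨l, ⟨-, hp⟩, rfl⟩ := hx
    simpa using hp
  exact loop_eq _ _ rfl hne []
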